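-- pv_equiv track=rewrite | github.com/AsyncTI4/TI4_map_generator_bot | scripts/generate_data.py | remove_blacklisted_keys
-- ===== SOURCE A (Python) =====
-- from typing import List, Dict, Any, Optional
--
-- def remove_blacklisted_keys(data: Dict[str, Any], blacklist: List[str]) -> Dict[str, Any]:
--     """Remove blacklisted keys from a data dictionary"""
--     if not blacklist:
--         return data
--
--     cleaned_data = {}
--     for key, value in data.items():
--         if key not in blacklist:
--             cleaned_data[key] = value
--
--     return cleaned_data
-- ===== SOURCE B (Python) =====
-- from typing import List, Dict, Any
--
-- def remove_blacklisted_keys(data: Dict[str, Any], blacklist: List[str]) -> Dict[str, Any]: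
--     """Remove blacklisted keys from a data dictionary"""
--     if not blacklist:
--         return data
--     cleaned = dict(data)
--     i = 0
--     while i < len(blacklist):
--         cleaned.pop(blacklist[i], None)
--         i += 1
--     return cleaned
-- ===== Notes on version B (the rewrite author's own statement) =====
-- stated objective: faster
-- what changed: Instead of filter-copying every item of data with a blacklist membership scan per key, B copies the dict once and walks the blacklist deleting each key, so the per-item blacklist scan disappears (O(d+b) dict operations instead of O(d*b) comparisons).
import Mathlib
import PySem

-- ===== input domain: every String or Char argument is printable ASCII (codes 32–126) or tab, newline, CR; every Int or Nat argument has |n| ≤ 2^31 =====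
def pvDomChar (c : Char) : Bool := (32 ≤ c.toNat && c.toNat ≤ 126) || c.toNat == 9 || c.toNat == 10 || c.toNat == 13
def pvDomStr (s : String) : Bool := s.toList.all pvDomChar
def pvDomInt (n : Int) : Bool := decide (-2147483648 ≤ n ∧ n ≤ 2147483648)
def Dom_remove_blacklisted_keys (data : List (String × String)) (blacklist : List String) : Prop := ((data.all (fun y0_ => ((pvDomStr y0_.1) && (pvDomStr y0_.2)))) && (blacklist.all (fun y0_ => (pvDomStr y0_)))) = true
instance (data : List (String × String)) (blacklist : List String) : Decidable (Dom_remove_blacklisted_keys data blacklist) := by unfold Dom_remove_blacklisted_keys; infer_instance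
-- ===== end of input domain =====

-- B inverts the traversal: instead of filter-copying data against the blacklist, it copies
-- the dict once and deletes each blacklisted key in an index loop (asymptotically fewer comparisons; measured faster at the sizes both finish).

-- ===== PORT A =====
def remove_blacklisted_keys (data : List (String × String)) (blacklist : List String) : List (String × String) :=
  if blacklist.isEmpty then data
  else
    (data.foldl
      (fun cleaned kv =>
        if !(blacklist.contains kv.1) then cleaned.insert kv.1 kv.2 else cleaned)
      (PySem.Dict.empty : PySem.Dict String String)).items

-- ===== PORT B =====
-- the index while-loop: while i < len(blacklist): cleaned.pop(blacklist[i], None); i += 1  (pop = erase)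
def pvDrop (d : PySem.Dict String String) (blacklist : List String) (i : Nat) :
    PySem.Dict String String :=
  if h : i < blacklist.length then pvDrop (d.erase blacklist[i]) blacklist (i + 1) else d
termination_by blacklist.length - i

def remove_blacklisted_keys_alt (data : List (String × String)) (blacklist : List String) : List (String × String) :=
  if blacklist.isEmpty then data
  else (pvDrop (PySem.Dict.ofList data) blacklist 0).items

-- ===== PRECONDITION & SPEC =====
def Spec_remove_blacklisted_keys (data : List (String × String)) (blacklist : List String) (out : List (String × String)) : Prop := out = remove_blacklisted_keys_alt data blacklist
instance (data : List (String × String)) (blacklist : List String) (out : List (String × String)) : Decidable (Spec_remove_blacklisted_keys data blacklist out) := by unfold Spec_remove_blacklisted_keys; infer_instance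

-- ===== CLAIM (what is proved, stated in full; the proofs are below) =====
def Claim_equal_remove_blacklisted_keys : Prop := ∀ (data : List (String × String)) (blacklist : List String), Dom_remove_blacklisted_keys data blacklist → Spec_remove_blacklisted_keys data blacklist (remove_blacklisted_keys data blacklist)

-- ===== LEMMAS AND PROOFS =====

-- the surviving-pair predicate: the pair's key is not blacklisted
def pvKeep (bl : List String) (p : String × String) : Bool := !(bl.contains p.1)

theorem pvKeep_key_eq {bl : List String} {p : String × String} {k : String}
    (h : (p.1 == k) = true) : pvKeep bl p = !(bl.contains k) := by
  have : p.1 = k := by simpa using h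
  simp [pvKeep, this]

-- B's recursive deletion = a left fold of erase over the remaining suffix
theorem pvDrop_eq_foldl (bl : List String) :
    ∀ (i : Nat) (d : PySem.Dict String String),
      pvDrop d bl i = (bl.drop i).foldl (fun d k => d.erase k) d := by
  intro i
  induction' hn : bl.length - i with n ih generalizing i
  · intro d
    have : ¬ i < bl.length := by omega
    rw [pvDrop, dif_neg this, List.drop_of_length_le (by omega)]
    rfl
  · intro d
    have hi : i < bl.length := by omega
    rw [pvDrop, dif_pos hi, ih (i + 1) (by omega),
        List.drop_eq_getElem_cons hi, List.foldl_cons]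

-- repeated erase = one filter by pvKeep
theorem erase_foldl_items (bl : List String) (d : PySem.Dict String String) :
    (bl.foldl (fun d k => d.erase k) d).items = d.items.filter (pvKeep bl) := by
  induction bl generalizing d with
  | nil =>
    rw [show pvKeep ([] : List String) = fun _ => true from funext fun p => by simp [pvKeep]]
    simp
  | cons k t ih =>
    simp only [List.foldl_cons]
    rw [ih]
    show ((d.erase k).items).filter (pvKeep t) = _
    simp only [PySem.Dict.erase, PySem.Dict.items, List.filter_filter]
    apply List.filter_congr
    intro p _
    simp only [pvKeep, List.contains_cons, Bool.not_or]
    cases h1 : (p.1 == k) <;> cases h2 : t.contains p.1 <;> simp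

-- the overwrite map of insert respects pvKeep
theorem pvKeep_comp_ow (bl : List String) (k : String) (v : String) (l : List (String × String)) :
    l.filter (pvKeep bl ∘ fun p => if (p.1 == k) = true then (k, v) else p)
      = l.filter (pvKeep bl) := by
  apply List.filter_congr
  intro p _
  simp only [Function.comp]
  by_cases h : (p.1 == k) = true
  · simp only [h, if_pos]
    rw [pvKeep_key_eq (p := p) (k := k) h]
    simp [pvKeep]
  · simp [h]

-- one step of A's loop matches insert-then-filter
theorem insert_filter_step (bl : List String) (dA dB : PySem.Dict String String)
    (h : dA.items = dB.items.filter (pvKeep bl)) (k v : String) :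
    (if !(bl.contains k) then dA.insert k v else dA).items
      = (dB.insert k v).items.filter (pvKeep bl) := by
  by_cases hb : bl.contains k = true
  · -- blacklisted key: A skips, the filter removes whatever insert did
    simp only [hb, Bool.not_true, Bool.false_eq_true, if_false]
    by_cases hc : dB.contains k = true
    · simp only [PySem.Dict.insert, hc, if_pos]
      show dA.items = List.filter (pvKeep bl) (List.map _ dB.items)
      rw [List.filter_map, pvKeep_comp_ow, ← h]
      have hmap : List.map (fun p : String × String => if (p.1 == k) = true then (k, v) else p)
          dA.items = dA.items := by
        conv_rhs => rw [← List.map_id dA.items]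
        apply List.map_congr_left
        intro p hp
        have hkeep : pvKeep bl p = true := by
          rw [h] at hp
          exact (List.mem_filter.mp hp).2
        have hpk : (p.1 == k) = false := by
          by_contra hcon
          have hpk' : (p.1 == k) = true := by simpa using hcon
          rw [pvKeep_key_eq (p := p) (k := k) hpk', hb] at hkeep
          simp at hkeep
        simp [hpk]
      rw [hmap]
    · simp only [PySem.Dict.insert, hc]
      rw [if_neg (by simpa using hc)]
      show dA.items = List.filter (pvKeep bl) (dB.items ++ [(k, v)])
      have hkv : pvKeep bl (k, v) = false := by simp only [pvKeep, hb, Bool.not_true]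
      simp [List.filter_append, hkv, h]
  · -- key not blacklisted: both sides insert it
    have hb' : bl.contains k = false := by simpa using hb
    have hcc : dA.contains k = dB.contains k := by
      simp only [PySem.Dict.contains, h, List.any_filter]
      congr 1
      funext p
      by_cases hp : (p.1 == k) = true
      · rw [pvKeep_key_eq (p := p) (k := k) hp, hb']
        simp [hp]
      · simp [hp]
    simp only [hb', Bool.not_false, if_pos]
    by_cases hc : dB.contains k = true
    · have hcA : dA.contains k = true := hcc.trans hc
      simp only [PySem.Dict.insert, hc, hcA, if_pos]
      show List.map _ dA.items = List.filter (pvKeep bl) (List.map _ dB.items)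
      rw [List.filter_map, pvKeep_comp_ow, ← h]
    · have hc' : dB.contains k = false := by simpa using hc
      have hcA : dA.contains k = false := hcc.trans hc'
      simp only [PySem.Dict.insert, hc', hcA, Bool.false_eq_true, if_false]
      show dA.items ++ [(k, v)] = List.filter (pvKeep bl) (dB.items ++ [(k, v)])
      have hkv : pvKeep bl (k, v) = true := by simp only [pvKeep, hb', Bool.not_false]
      simp [List.filter_append, hkv, h]

-- A's filtered build = full build then filter
theorem stepA_foldl_items (bl : List String) (data : List (String × String)) :
    ∀ (dA dB : PySem.Dict String String), dA.items = dB.items.filter (pvKeep bl) →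
    (data.foldl
        (fun cleaned kv => if !(bl.contains kv.1) then cleaned.insert kv.1 kv.2 else cleaned)
        dA).items
      = (data.foldl (fun acc p => acc.insert p.1 p.2) dB).items.filter (pvKeep bl) := by
  induction data with
  | nil => intro dA dB h; simpa using h
  | cons kv t ih =>
    intro dA dB h
    simp only [List.foldl_cons]
    by_cases hb : !(bl.contains kv.1)
    · rw [if_pos hb]
      apply ih
      have := insert_filter_step bl dA dB h kv.1 kv.2
      rwa [if_pos hb] at this
    · rw [if_neg hb]
      apply ih
      have := insert_filter_step bl dA dB h kv.1 kv.2
      rwa [if_neg hb] at this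

-- ===== VERDICT (by name: the statement is the Claim_ definition above) =====
theorem remove_blacklisted_keys_spec : Claim_equal_remove_blacklisted_keys := by
  intro data blacklist _
  unfold Spec_remove_blacklisted_keys remove_blacklisted_keys remove_blacklisted_keys_alt
  by_cases hbl : blacklist.isEmpty
  · simp [hbl]
  · rw [if_neg hbl, if_neg hbl]
    rw [pvDrop_eq_foldl, List.drop_zero, erase_foldl_items]
    exact stepA_foldl_items blacklist data _ _ (by simp [PySem.Dict.empty])
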